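-- pv_equiv track=rewrite | github.com/brojyf/ProteinExt3-Comparison | fasta/filtered.py | propagate_labels
-- ===== SOURCE A (Python) =====
-- from collections import defaultdict
--
-- ASPECTS = {"p", "f", "c"}
--
-- def parse_label_row(row: str) -> tuple[str, str, str] | None:
--     parts = row.split("\t")
--     if len(parts) < 3:
--         return None
--
--     protein_id = parts[0].strip()
--     go_term = parts[1].strip()
--     aspect = parts[2].strip().lower()
--     if not protein_id or not go_term.startswith("GO:") or aspect not in ASPECTS:
--         return None
--
--     return protein_id, go_term, aspect
--
-- def propagate_labels(
--     rows_by_protein_id: dict[str, list[str]],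
--     parents: dict[str, set[str]],
-- ) -> tuple[dict[str, list[str]], dict[str, int]]:
--     propagated_rows_by_protein_id = {}
--     original_annotations = 0
--     propagated_annotations = 0
--
--     for protein_id, rows in rows_by_protein_id.items():
--         labels_by_aspect = defaultdict(set)
--         for row in rows:
--             parsed = parse_label_row(row)
--             if parsed is None:
--                 continue
--             _, go_term, aspect = parsed
--             labels_by_aspect[aspect].add(go_term)
--
--         propagated_labels = set()
--         for aspect, terms in labels_by_aspect.items():
--             queue = list(terms)
--             seen = set()
--             while queue:
--                 term = queue.pop(0)
--                 if term in seen: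
--                     continue
--                 seen.add(term)
--
--                 propagated_labels.add((term, aspect))
--                 queue.extend(parents.get(term, []))
--
--         original_annotations += sum(len(terms) for terms in labels_by_aspect.values())
--         propagated_annotations += len(propagated_labels)
--         propagated_rows_by_protein_id[protein_id] = [
--             f"{protein_id}\t{go_term}\t{aspect}"
--             for go_term, aspect in sorted(propagated_labels, key=lambda item: (item[1], item[0]))
--         ]
--
--     return propagated_rows_by_protein_id, {
--         "labels_before_propagation": original_annotations,
--         "labels_after_propagation": propagated_annotations,
--         "propagated_label_rows_added": propagated_annotations - original_annotations,
--     }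
-- ===== SOURCE B (Python) =====
-- # B: staged passes -- per-protein distinct (term, aspect) pairs (no per-aspect dict),
-- # per-term iterative-DFS closure, pure per-protein results then a separate assembly pass.
-- ASPECTS = {"p", "f", "c"}
--
-- def parse_label_row(row):
--     parts = row.split("\t")
--     if len(parts) < 3:
--         return None
--     protein_id = parts[0].strip()
--     go_term = parts[1].strip()
--     aspect = parts[2].strip().lower()
--     if not protein_id or not go_term.startswith("GO:") or aspect not in ASPECTS:
--         return None
--     return protein_id, go_term, aspect
--
-- def _closure(term, parents):
--     seen = set()
--     stack = [term]
--     while stack: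
--         t = stack.pop()
--         if t not in seen:
--             seen.add(t)
--             stack.extend(parents.get(t, ()))
--     return seen
--
-- def _protein_result(protein_id, rows, parents):
--     pairs = {p[1:] for row in rows if (p := parse_label_row(row)) is not None}
--     prop = {(anc, aspect) for term, aspect in pairs for anc in _closure(term, parents)}
--     lines = [
--         f"{protein_id}\t{go_term}\t{aspect}"
--         for go_term, aspect in sorted(prop, key=lambda item: (item[1], item[0]))
--     ]
--     return protein_id, lines, len(pairs), len(prop)
--
-- def propagate_labels(rows_by_protein_id, parents):
--     results = [
--         _protein_result(pid, rows, parents)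
--         for pid, rows in rows_by_protein_id.items()
--     ]
--     out = {}
--     for pid, lines, _, _ in results:
--         out[pid] = lines
--     before = sum(r[2] for r in results)
--     after = sum(r[3] for r in results)
--     return out, {
--         "labels_before_propagation": before,
--         "labels_after_propagation": after,
--         "propagated_label_rows_added": after - before,
--     }
-- ===== Notes on version B (the rewrite author's own statement) =====
-- stated objective: alternative
-- what changed: A's single stateful loop with a per-aspect grouping dict and a per-aspect BFS queue is replaced by staged passes: each protein maps to a pure result built from its distinct (term, aspect) pairs (no grouping dict) with a per-term iterative-DFS closure, and the output dict and both counters are assembled from those results in separate passes.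
import Mathlib
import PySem

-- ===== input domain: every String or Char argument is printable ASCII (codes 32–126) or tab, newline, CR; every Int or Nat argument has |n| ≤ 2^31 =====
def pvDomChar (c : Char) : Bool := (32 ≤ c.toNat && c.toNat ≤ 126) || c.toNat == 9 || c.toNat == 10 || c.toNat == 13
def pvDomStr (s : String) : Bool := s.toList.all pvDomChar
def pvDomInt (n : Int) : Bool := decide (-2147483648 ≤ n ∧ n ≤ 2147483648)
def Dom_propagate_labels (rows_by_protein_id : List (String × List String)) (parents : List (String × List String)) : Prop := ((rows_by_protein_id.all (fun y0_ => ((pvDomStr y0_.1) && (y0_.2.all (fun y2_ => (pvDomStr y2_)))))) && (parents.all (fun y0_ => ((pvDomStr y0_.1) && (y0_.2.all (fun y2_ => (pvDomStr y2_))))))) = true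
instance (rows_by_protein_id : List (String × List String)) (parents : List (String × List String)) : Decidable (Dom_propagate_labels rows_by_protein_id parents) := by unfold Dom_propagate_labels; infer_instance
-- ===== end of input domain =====

-- B restructures A's single stateful loop (per-aspect grouping dict + per-aspect BFS queue)
-- into staged passes: distinct (term, aspect) pairs per protein, per-term DFS closures,
-- a pure per-protein map, then separate assembly passes (objective: alternative).

-- ===== PORT A =====
-- parse_label_row (this helper is verbatim identical in A's module and in Source B; shared by both ports)
def parse_label_row (row : String) : Option (String × String × String) :=
  let parts := (PySem.Str.split? row "\t").getD []   -- sep "\t" ≠ "" so split? is always `some`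
  if parts.length < 3 then none
  else
    let protein_id := PySem.Str.strip (PySem.List.pyGetD parts 0 "")
    let go_term := PySem.Str.strip (PySem.List.pyGetD parts 1 "")
    let aspect := PySem.Str.lower (PySem.Str.strip (PySem.List.pyGetD parts 2 ""))
    if protein_id = "" ∨ ¬ (PySem.Str.startswith go_term "GO:") ∨ ¬ (aspect ∈ ["p", "f", "c"]) then none
    else some (protein_id, go_term, aspect)

-- parents.get(term, []) : first-match lookup in the association list (both sources)
def pGet (parents : List (String × List String)) (t : String) : List String :=
  match parents.find? (fun p => p.1 == t) with
  | some p => p.2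
  | none => []

-- all strings that pGet can ever return or look up (used only for the termination measure)
def pUniv (parents : List (String × List String)) : List String :=
  parents.flatMap (fun p => p.1 :: p.2)

theorem pGet_eq_nil_of_not_mem_univ (parents : List (String × List String)) (t : String)
    (h : t ∉ pUniv parents) : pGet parents t = [] := by
  unfold pGet
  cases hf : parents.find? (fun p => p.1 == t) with
  | none => rfl
  | some p =>
    exact absurd (by
      have hmem := List.mem_of_find?_eq_some hf
      have heq : p.1 = t := by simpa using List.find?_some hf
      simp only [pUniv, List.mem_flatMap]
      exact ⟨p, hmem, by simp [heq]⟩) h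

theorem seen_filter_lt (U : List String) (seen : PySem.Set String) (t : String)
    (hU : t ∈ U) (hs : ¬ t ∈ seen) :
    (U.filter (fun x => !(PySem.Set.contains (PySem.Set.add seen t) x))).length <
      (U.filter (fun x => !(PySem.Set.contains seen x))).length := by
  have hcong : U.filter (fun x => !(PySem.Set.contains (PySem.Set.add seen t) x))
      = (U.filter (fun x => !(PySem.Set.contains seen x))).filter (fun x => !(x == t)) := by
    rw [List.filter_filter]
    apply List.filter_congr
    intro x _
    by_cases h1 : x ∈ seen <;> by_cases h2 : x = t <;> simp_all
  rw [hcong]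
  apply List.length_filter_lt_length_iff_exists.mpr
  exact ⟨t, by simp [hs, hU], by simp⟩

theorem seen_filter_eq (U : List String) (seen : PySem.Set String) (t : String)
    (hU : ¬ t ∈ U) :
    (U.filter (fun x => !(PySem.Set.contains (PySem.Set.add seen t) x))).length =
      (U.filter (fun x => !(PySem.Set.contains seen x))).length := by
  congr 1
  apply List.filter_congr
  intro x hx
  have hxt : x ≠ t := fun h => hU (h ▸ hx)
  by_cases h1 : x ∈ seen <;> simp_all [PySem.Set.mem_add]

-- A's while-loop: term = queue.pop(0); seen guard; seen.add / propagated_labels.add / queue.extend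
def bfsA (parents : List (String × List String)) (aspect : String) :
    List String → PySem.Set String → PySem.Set (String × String) →
      PySem.Set String × PySem.Set (String × String)
  | [], seen, acc => (seen, acc)
  | t :: rest, seen, acc =>
      if PySem.Set.contains seen t then bfsA parents aspect rest seen acc
      else bfsA parents aspect (rest ++ pGet parents t) (PySem.Set.add seen t)
        (PySem.Set.add acc (t, aspect))
termination_by queue seen _ =>
  (((pUniv parents).filter (fun x => !(PySem.Set.contains seen x))).length, queue.length)
decreasing_by
  · exact Prod.Lex.right _ (by simp)
  · rename_i ht
    by_cases hU : t ∈ pUniv parents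
    · exact Prod.Lex.left _ _ (seen_filter_lt _ _ _ hU (by
        simpa [PySem.Set.contains_iff] using ht))
    · rw [seen_filter_eq (pUniv parents) seen t hU]
      exact Prod.Lex.right _ (by simp [pGet_eq_nil_of_not_mem_univ parents t hU])

-- A's labels_by_aspect: defaultdict(set) grouped by aspect
def collectLabels (rows : List String) : PySem.Dict String (PySem.Set String) :=
  rows.foldl (fun d row =>
    match parse_label_row row with
    | none => d
    | some r => d.insert r.2.2 (PySem.Set.add (d.getD r.2.2 PySem.Set.empty) r.2.1))
    PySem.Dict.empty

def propagate_labels (rows_by_protein_id : List (String × List String)) (parents : List (String × List String)) : (List (String × List String)) × (List (String × Int)) :=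
  let st := rows_by_protein_id.foldl (fun st pr =>
    let lba := collectLabels pr.2
    let prop := lba.items.foldl
      (fun acc it => (bfsA parents it.1 it.2 PySem.Set.empty acc).2) PySem.Set.empty
    let sortedPairs := PySem.List.sorted2 prop (fun p => p.2) (fun p => p.1) false
    (st.1.insert pr.1 (sortedPairs.map (fun p => pr.1 ++ "\t" ++ p.1 ++ "\t" ++ p.2)),
     st.2.1 + (lba.values.map (fun s => PySem.Set.len s)).sum,
     st.2.2 + PySem.Set.len prop))
    ((PySem.Dict.empty : PySem.Dict String (List String)), (0 : Int), (0 : Int))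
  (st.1.items,
   [("labels_before_propagation", st.2.1),
    ("labels_after_propagation", st.2.2),
    ("propagated_label_rows_added", st.2.2 - st.2.1)])

-- ===== PORT B =====
-- B's _closure while-loop: t = stack.pop() (top of stack = head here, so extend pushes the
-- children reversed in front — an exact simulation of pop-from-the-end)
def dfsB (parents : List (String × List String)) :
    List String → PySem.Set String → PySem.Set String
  | [], seen => seen
  | t :: rest, seen =>
      if PySem.Set.contains seen t then dfsB parents rest seen
      else dfsB parents ((pGet parents t).reverse ++ rest) (PySem.Set.add seen t)
termination_by stack seen =>
  (((pUniv parents).filter (fun x => !(PySem.Set.contains seen x))).length, stack.length)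
decreasing_by
  · exact Prod.Lex.right _ (by simp)
  · rename_i ht
    by_cases hU : t ∈ pUniv parents
    · exact Prod.Lex.left _ _ (seen_filter_lt _ _ _ hU (by
        simpa [PySem.Set.contains_iff] using ht))
    · rw [seen_filter_eq (pUniv parents) seen t hU]
      exact Prod.Lex.right _ (by simp [pGet_eq_nil_of_not_mem_univ parents t hU])

def closureB (parents : List (String × List String)) (term : String) : PySem.Set String :=
  dfsB parents [term] PySem.Set.empty

-- {p[1:] for row in rows if (p := parse_label_row(row)) is not None}
def parsePairs (rows : List String) : PySem.Set (String × String) :=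
  rows.foldl (fun s row =>
    match parse_label_row row with
    | none => s
    | some r => PySem.Set.add s (r.2.1, r.2.2)) PySem.Set.empty

-- {(anc, aspect) for term, aspect in pairs for anc in _closure(term, parents)}
def propPairs (parents : List (String × List String))
    (pairs : PySem.Set (String × String)) : PySem.Set (String × String) :=
  pairs.foldl (fun acc q =>
    (closureB parents q.1).foldl (fun a anc => PySem.Set.add a (anc, q.2)) acc)
    PySem.Set.empty

-- _protein_result: (protein_id, lines, len(pairs), len(prop))
def proteinResult (parents : List (String × List String)) (pr : String × List String) :
    String × List String × Int × Int :=
  let pairs := parsePairs pr.2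
  let prop := propPairs parents pairs
  (pr.1,
   (PySem.List.sorted2 prop (fun p => p.2) (fun p => p.1) false).map
     (fun p => pr.1 ++ "\t" ++ p.1 ++ "\t" ++ p.2),
   PySem.Set.len pairs,
   PySem.Set.len prop)

def propagate_labels_alt (rows_by_protein_id : List (String × List String)) (parents : List (String × List String)) : (List (String × List String)) × (List (String × Int)) :=
  let results := rows_by_protein_id.map (proteinResult parents)
  let out := results.foldl (fun d r => d.insert r.1 r.2.1)
    (PySem.Dict.empty : PySem.Dict String (List String))
  let before := (results.map (fun r => r.2.2.1)).sum
  let after := (results.map (fun r => r.2.2.2)).sum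
  (out.items,
   [("labels_before_propagation", before),
    ("labels_after_propagation", after),
    ("propagated_label_rows_added", after - before)])

-- ===== PRECONDITION & SPEC =====
def Spec_propagate_labels (rows_by_protein_id : List (String × List String)) (parents : List (String × List String)) (out : (List (String × List String)) × (List (String × Int))) : Prop := out = propagate_labels_alt rows_by_protein_id parents
instance (rows_by_protein_id : List (String × List String)) (parents : List (String × List String)) (out : (List (String × List String)) × (List (String × Int))) : Decidable (Spec_propagate_labels rows_by_protein_id parents out) := by unfold Spec_propagate_labels; infer_instance

-- ===== CLAIM (what is proved, stated in full; the proofs are below) =====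
def Claim_equal_propagate_labels : Prop := ∀ (rows_by_protein_id : List (String × List String)) (parents : List (String × List String)), Dom_propagate_labels rows_by_protein_id parents → Spec_propagate_labels rows_by_protein_id parents (propagate_labels rows_by_protein_id parents)

-- ===== LEMMAS AND PROOFS =====

def Step (parents : List (String × List String)) (a b : String) : Prop := b ∈ pGet parents a
def Reach (parents : List (String × List String)) : String → String → Prop :=
  Relation.ReflTransGen (Step parents)

theorem reach_escape (parents : List (String × List String)) (seen : PySem.Set String)
    (Q : List String)
    (inv : ∀ s ∈ seen, ∀ c ∈ pGet parents s, c ∈ seen ∨ c ∈ Q)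
    {t x : String} (hr : Reach parents t x) (ht : t ∈ seen) :
    x ∈ seen ∨ ∃ u ∈ Q, Reach parents u x := by
  induction hr using Relation.ReflTransGen.head_induction_on with
  | refl => exact Or.inl ht
  | head h' hrest ih =>
    rename_i a c
    rcases inv a ht c h' with hc | hc
    · exact ih hc
    · exact Or.inr ⟨c, hc, hrest⟩

theorem bfsA_seen_mem (parents : List (String × List String)) (aspect : String) :
    ∀ (queue : List String) (seen : PySem.Set String) (acc : PySem.Set (String × String)),
    (∀ s ∈ seen, ∀ c ∈ pGet parents s, c ∈ seen ∨ c ∈ queue) →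
    ∀ x, x ∈ (bfsA parents aspect queue seen acc).1 ↔
      (x ∈ seen ∨ ∃ t ∈ queue, Reach parents t x) := by
  intro queue seen acc
  induction queue, seen, acc using bfsA.induct parents aspect with
  | case1 seen acc =>
    intro _ x
    simp [bfsA]
  | case2 t rest seen acc hc ih =>
    intro inv x
    rw [bfsA, if_pos hc]
    have htseen : t ∈ seen := (PySem.Set.contains_iff _ _).mp hc
    have inv' : ∀ s ∈ seen, ∀ c ∈ pGet parents s, c ∈ seen ∨ c ∈ rest := by
      intro s hs c hcm
      rcases inv s hs c hcm with h | h
      · exact Or.inl h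
      · rcases List.mem_cons.mp h with rfl | h2
        · exact Or.inl htseen
        · exact Or.inr h2
    rw [ih inv' x]
    constructor
    · rintro (h | ⟨u, hu, hr⟩)
      · exact Or.inl h
      · exact Or.inr ⟨u, List.mem_cons_of_mem _ hu, hr⟩
    · rintro (h | ⟨u, hu, hr⟩)
      · exact Or.inl h
      · rcases List.mem_cons.mp hu with rfl | h2
        · exact reach_escape parents seen rest inv' hr htseen
        · exact Or.inr ⟨u, h2, hr⟩
  | case3 t rest seen acc hc ih =>
    intro inv x
    rw [bfsA, if_neg hc]
    have htseen : ¬ t ∈ seen := fun h => hc ((PySem.Set.contains_iff _ _).mpr h)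
    have inv' : ∀ s ∈ PySem.Set.add seen t, ∀ c ∈ pGet parents s,
        c ∈ PySem.Set.add seen t ∨ c ∈ rest ++ pGet parents t := by
      intro s hs c hcm
      rcases (PySem.Set.mem_add _ _ _).mp hs with hs' | rfl
      · rcases inv s hs' c hcm with h | h
        · exact Or.inl ((PySem.Set.mem_add _ _ _).mpr (Or.inl h))
        · rcases List.mem_cons.mp h with rfl | h2
          · exact Or.inl ((PySem.Set.mem_add _ _ _).mpr (Or.inr rfl))
          · exact Or.inr (List.mem_append_left _ h2)
      · exact Or.inr (List.mem_append_right _ hcm)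
    rw [ih inv' x]
    constructor
    · rintro (h | ⟨u, hu, hr⟩)
      · rcases (PySem.Set.mem_add _ _ _).mp h with h' | rfl
        · exact Or.inl h'
        · exact Or.inr ⟨x, List.mem_cons_self, Relation.ReflTransGen.refl⟩
      · rcases List.mem_append.mp hu with h2 | h2
        · exact Or.inr ⟨u, List.mem_cons_of_mem _ h2, hr⟩
        · exact Or.inr ⟨t, List.mem_cons_self, Relation.ReflTransGen.head h2 hr⟩
    · rintro (h | ⟨u, hu, hr⟩)
      · exact Or.inl ((PySem.Set.mem_add _ _ _).mpr (Or.inl h))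
      · rcases List.mem_cons.mp hu with rfl | h2
        · rcases Relation.ReflTransGen.cases_head hr with rfl | ⟨c, hstep, hr2⟩
          · exact Or.inl ((PySem.Set.mem_add _ _ _).mpr (Or.inr rfl))
          · exact Or.inr ⟨c, List.mem_append_right _ hstep, hr2⟩
        · exact Or.inr ⟨u, List.mem_append_left _ h2, hr⟩

theorem bfsA_acc_mem (parents : List (String × List String)) (aspect : String) :
    ∀ (queue : List String) (seen : PySem.Set String) (acc : PySem.Set (String × String))
      (acc0 : PySem.Set (String × String)),
    (∀ p, p ∈ acc ↔ p ∈ acc0 ∨ (p.2 = aspect ∧ p.1 ∈ seen)) →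
    ∀ p, p ∈ (bfsA parents aspect queue seen acc).2 ↔
      (p ∈ acc0 ∨ (p.2 = aspect ∧ p.1 ∈ (bfsA parents aspect queue seen acc).1)) := by
  intro queue seen acc
  induction queue, seen, acc using bfsA.induct parents aspect with
  | case1 seen acc =>
    intro acc0 hrel p
    simpa [bfsA] using hrel p
  | case2 t rest seen acc hc ih =>
    intro acc0 hrel p
    rw [bfsA, if_pos hc]
    exact ih acc0 hrel p
  | case3 t rest seen acc hc ih =>
    intro acc0 hrel p
    rw [bfsA, if_neg hc]
    apply ih acc0
    intro q
    rw [PySem.Set.mem_add]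
    rw [hrel q]
    constructor
    · rintro ((h | ⟨h1, h2⟩) | rfl)
      · exact Or.inl h
      · exact Or.inr ⟨h1, (PySem.Set.mem_add _ _ _).mpr (Or.inl h2)⟩
      · exact Or.inr ⟨rfl, (PySem.Set.mem_add _ _ _).mpr (Or.inr rfl)⟩
    · rintro (h | ⟨h1, h2⟩)
      · exact Or.inl (Or.inl h)
      · rcases (PySem.Set.mem_add _ _ _).mp h2 with h3 | h3
        · exact Or.inl (Or.inr ⟨h1, h3⟩)
        · exact Or.inr (by cases q; simp_all)

theorem bfsA_acc_nodup (parents : List (String × List String)) (aspect : String) :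
    ∀ (queue : List String) (seen : PySem.Set String) (acc : PySem.Set (String × String)),
    acc.Nodup → (bfsA parents aspect queue seen acc).2.Nodup := by
  intro queue seen acc
  induction queue, seen, acc using bfsA.induct parents aspect with
  | case1 seen acc => intro h; simpa [bfsA] using h
  | case2 t rest seen acc hc ih => intro h; rw [bfsA, if_pos hc]; exact ih h
  | case3 t rest seen acc hc ih =>
    intro h; rw [bfsA, if_neg hc]; exact ih (PySem.Set.nodup_add _ _ h)

theorem dfsB_seen_mem (parents : List (String × List String)) :
    ∀ (stack : List String) (seen : PySem.Set String),
    (∀ s ∈ seen, ∀ c ∈ pGet parents s, c ∈ seen ∨ c ∈ stack) →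
    ∀ x, x ∈ dfsB parents stack seen ↔ (x ∈ seen ∨ ∃ t ∈ stack, Reach parents t x) := by
  intro stack seen
  induction stack, seen using dfsB.induct parents with
  | case1 seen => intro _ x; simp [dfsB]
  | case2 t rest seen hc ih =>
    intro inv x
    rw [dfsB, if_pos hc]
    have htseen : t ∈ seen := (PySem.Set.contains_iff _ _).mp hc
    have inv' : ∀ s ∈ seen, ∀ c ∈ pGet parents s, c ∈ seen ∨ c ∈ rest := by
      intro s hs c hcm
      rcases inv s hs c hcm with h | h
      · exact Or.inl h
      · rcases List.mem_cons.mp h with rfl | h2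
        · exact Or.inl htseen
        · exact Or.inr h2
    rw [ih inv' x]
    constructor
    · rintro (h | ⟨u, hu, hr⟩)
      · exact Or.inl h
      · exact Or.inr ⟨u, List.mem_cons_of_mem _ hu, hr⟩
    · rintro (h | ⟨u, hu, hr⟩)
      · exact Or.inl h
      · rcases List.mem_cons.mp hu with rfl | h2
        · exact reach_escape parents seen rest inv' hr htseen
        · exact Or.inr ⟨u, h2, hr⟩
  | case3 t rest seen hc ih =>
    intro inv x
    rw [dfsB, if_neg hc]
    have inv' : ∀ s ∈ PySem.Set.add seen t, ∀ c ∈ pGet parents s,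
        c ∈ PySem.Set.add seen t ∨ c ∈ (pGet parents t).reverse ++ rest := by
      intro s hs c hcm
      rcases (PySem.Set.mem_add _ _ _).mp hs with hs' | rfl
      · rcases inv s hs' c hcm with h | h
        · exact Or.inl ((PySem.Set.mem_add _ _ _).mpr (Or.inl h))
        · rcases List.mem_cons.mp h with rfl | h2
          · exact Or.inl ((PySem.Set.mem_add _ _ _).mpr (Or.inr rfl))
          · exact Or.inr (List.mem_append_right _ h2)
      · exact Or.inr (List.mem_append_left _ (List.mem_reverse.mpr hcm))
    rw [ih inv' x]
    constructor
    · rintro (h | ⟨u, hu, hr⟩)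
      · rcases (PySem.Set.mem_add _ _ _).mp h with h' | rfl
        · exact Or.inl h'
        · exact Or.inr ⟨x, List.mem_cons_self, Relation.ReflTransGen.refl⟩
      · rcases List.mem_append.mp hu with h2 | h2
        · exact Or.inr ⟨t, List.mem_cons_self,
            Relation.ReflTransGen.head (List.mem_reverse.mp h2) hr⟩
        · exact Or.inr ⟨u, List.mem_cons_of_mem _ h2, hr⟩
    · rintro (h | ⟨u, hu, hr⟩)
      · exact Or.inl ((PySem.Set.mem_add _ _ _).mpr (Or.inl h))
      · rcases List.mem_cons.mp hu with rfl | h2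
        · rcases Relation.ReflTransGen.cases_head hr with rfl | ⟨c, hstep, hr2⟩
          · exact Or.inl ((PySem.Set.mem_add _ _ _).mpr (Or.inr rfl))
          · exact Or.inr ⟨c, List.mem_append_left _ (List.mem_reverse.mpr hstep), hr2⟩
        · exact Or.inr ⟨u, List.mem_append_right _ h2, hr⟩

theorem mem_closureB (parents : List (String × List String)) (t x : String) :
    x ∈ closureB parents t ↔ Reach parents t x := by
  unfold closureB
  rw [dfsB_seen_mem parents [t] PySem.Set.empty
    (by intro s hs; simp [PySem.Set.empty] at hs)]
  simp [PySem.Set.empty]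

theorem foldl_add_pair_mem (l : List String) (a : String)
    (s : PySem.Set (String × String)) (p : String × String) :
    p ∈ l.foldl (fun pr x => PySem.Set.add pr (x, a)) s ↔ (p ∈ s ∨ ∃ x ∈ l, p = (x, a)) := by
  simpa using PySem.Set.mem_foldl_add (f := fun x => (x, a)) (l := l) (s := s) (y := p)

theorem foldl_add_pair_nodup (l : List String) (a : String)
    (s : PySem.Set (String × String)) (h : s.Nodup) :
    (l.foldl (fun pr x => PySem.Set.add pr (x, a)) s).Nodup := by
  induction l generalizing s with
  | nil => exact h
  | cons x xs ih => exact ih _ (PySem.Set.nodup_add _ _ h)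

theorem propA_spec (parents : List (String × List String)) :
    ∀ (items : List (String × PySem.Set String)) (acc : PySem.Set (String × String)),
    acc.Nodup →
    (items.foldl (fun acc it => (bfsA parents it.1 it.2 PySem.Set.empty acc).2) acc).Nodup ∧
    (∀ p, p ∈ items.foldl (fun acc it => (bfsA parents it.1 it.2 PySem.Set.empty acc).2) acc ↔
      (p ∈ acc ∨ ∃ it ∈ items, p.2 = it.1 ∧ ∃ t ∈ it.2, Reach parents t p.1)) := by
  intro items
  induction items with
  | nil => intro acc h; exact ⟨h, by simp⟩
  | cons it its ih =>
    intro acc hnd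
    simp only [List.foldl_cons]
    have hseen := bfsA_seen_mem parents it.1 it.2 PySem.Set.empty acc
      (by intro s hs; simp [PySem.Set.empty] at hs)
    have hacc := bfsA_acc_mem parents it.1 it.2 PySem.Set.empty acc acc
      (by intro p; simp [PySem.Set.empty])
    have hnd' := bfsA_acc_nodup parents it.1 it.2 PySem.Set.empty acc hnd
    obtain ⟨g1, g2⟩ := ih _ hnd'
    refine ⟨g1, ?_⟩
    intro p
    rw [g2 p]
    constructor
    · rintro (h | ⟨jt, hjt, hpa, u, hu, hr⟩)
      · rw [hacc p] at h
        rcases h with h | ⟨h1, h2⟩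
        · exact Or.inl h
        · rw [hseen p.1] at h2
          rcases h2 with h3 | ⟨u, hu, hr⟩
          · simp [PySem.Set.empty] at h3
          · exact Or.inr ⟨it, List.mem_cons_self, h1, u, hu, hr⟩
      · exact Or.inr ⟨jt, List.mem_cons_of_mem _ hjt, hpa, u, hu, hr⟩
    · rintro (h | ⟨jt, hjt, hpa, u, hu, hr⟩)
      · exact Or.inl ((hacc p).mpr (Or.inl h))
      · rcases List.mem_cons.mp hjt with rfl | h2
        · exact Or.inl ((hacc p).mpr (Or.inr ⟨hpa, (hseen p.1).mpr (Or.inr ⟨u, hu, hr⟩)⟩))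
        · exact Or.inr ⟨jt, h2, hpa, u, hu, hr⟩

theorem propPairs_inv (parents : List (String × List String)) :
    ∀ (l : List (String × String)) (acc : PySem.Set (String × String)), acc.Nodup →
    (l.foldl (fun acc q =>
      (closureB parents q.1).foldl (fun a anc => PySem.Set.add a (anc, q.2)) acc) acc).Nodup ∧
    ∀ p, p ∈ l.foldl (fun acc q =>
      (closureB parents q.1).foldl (fun a anc => PySem.Set.add a (anc, q.2)) acc) acc ↔
      (p ∈ acc ∨ ∃ q ∈ l, p.2 = q.2 ∧ Reach parents q.1 p.1) := by
  intro l
  induction l with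
  | nil => intro acc h; exact ⟨h, by simp⟩
  | cons q qs ih =>
    intro acc hnd
    simp only [List.foldl_cons]
    obtain ⟨g1, g2⟩ := ih _ (foldl_add_pair_nodup _ _ _ hnd)
    refine ⟨g1, ?_⟩
    intro p
    rw [g2 p, foldl_add_pair_mem]
    constructor
    · rintro ((h | ⟨x, hx, rfl⟩) | ⟨u, hu, hpa, hr⟩)
      · exact Or.inl h
      · exact Or.inr ⟨q, List.mem_cons_self, rfl, (mem_closureB parents q.1 x).mp hx⟩
      · exact Or.inr ⟨u, List.mem_cons_of_mem _ hu, hpa, hr⟩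
    · rintro (h | ⟨u, hu, hpa, hr⟩)
      · exact Or.inl (Or.inl h)
      · rcases List.mem_cons.mp hu with rfl | h2
        · exact Or.inl (Or.inr ⟨p.1, (mem_closureB parents u.1 p.1).mpr hr,
            by cases p; simp_all⟩)
        · exact Or.inr ⟨u, h2, hpa, hr⟩

-- the single-row step of the collectLabels / parsePairs correspondence
theorem step_inv (d : PySem.Dict String (PySem.Set String)) (s : PySem.Set (String × String))
    (term aspect : String)
    (hk : d.keys.Nodup) (hs : s.Nodup)
    (hmem : ∀ t a, (t, a) ∈ s ↔ t ∈ d.getD a PySem.Set.empty)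
    (hsum : (d.keys.map (fun k => PySem.Set.len (d.getD k PySem.Set.empty))).sum
      = PySem.Set.len s) :
    (d.insert aspect (PySem.Set.add (d.getD aspect PySem.Set.empty) term)).keys.Nodup ∧
    (PySem.Set.add s (term, aspect)).Nodup ∧
    (∀ t a, (t, a) ∈ PySem.Set.add s (term, aspect) ↔
      t ∈ (d.insert aspect (PySem.Set.add (d.getD aspect PySem.Set.empty) term)).getD a
        PySem.Set.empty) ∧
    (((d.insert aspect (PySem.Set.add (d.getD aspect PySem.Set.empty) term)).keys.map
      (fun k => PySem.Set.len ((d.insert aspect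
        (PySem.Set.add (d.getD aspect PySem.Set.empty) term)).getD k PySem.Set.empty))).sum
      = PySem.Set.len (PySem.Set.add s (term, aspect))) := by
  set old := d.getD aspect PySem.Set.empty with hold
  set d' := d.insert aspect (PySem.Set.add old term) with hd'
  have hgetD' : ∀ a, d'.getD a PySem.Set.empty =
      if a = aspect then PySem.Set.add old term else d.getD a PySem.Set.empty := by
    intro a
    rw [hd', PySem.Dict.getD_insert]
  refine ⟨PySem.Dict.nodup_keys_insert _ _ _ hk, PySem.Set.nodup_add _ _ hs, ?_, ?_⟩
  · intro t a
    rw [PySem.Set.mem_add, hmem t a, hgetD']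
    by_cases ha : a = aspect
    · subst ha
      rw [if_pos rfl, PySem.Set.mem_add]
      constructor
      · rintro (h | h)
        · exact Or.inl h
        · exact Or.inr (congrArg Prod.fst h)
      · rintro (h | rfl)
        · exact Or.inl h
        · exact Or.inr rfl
    · rw [if_neg ha]
      constructor
      · rintro (h | h)
        · exact h
        · exact absurd (congrArg Prod.snd h) ha
      · exact fun h => Or.inl h
  · -- the counting invariant
    have hsadd : PySem.Set.len (PySem.Set.add s (term, aspect)) =
        if term ∈ old then PySem.Set.len s else PySem.Set.len s + 1 := by
      by_cases hmo : term ∈ old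
      · simp [hmo, PySem.Set.add_of_mem ((hmem term aspect).mpr hmo)]
      · simp [hmo, PySem.Set.add_of_not_mem (fun h => hmo ((hmem term aspect).mp h)),
          PySem.Set.len]
    have hlen_add : PySem.Set.len (PySem.Set.add old term) =
        if term ∈ old then PySem.Set.len old else PySem.Set.len old + 1 := by
      by_cases hmo : term ∈ old
      · simp [hmo]
      · simp [hmo]
    by_cases hc : d.contains aspect
    · -- overwrite in place: the key list is unchanged
      have hkeys : d'.keys = d.keys := by
        rw [hd']; exact PySem.Dict.keys_insert_of_contains d _ hc
      have hmemk : aspect ∈ d.keys := (PySem.Dict.contains_iff_mem_keys d aspect).mp hc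
      have hperm : d.keys.Perm (aspect :: d.keys.erase aspect) :=
        List.perm_cons_erase hmemk
      have hne : ∀ k ∈ d.keys.erase aspect, k ≠ aspect := by
        intro k hkm
        have := (List.Nodup.mem_erase_iff hk).mp hkm
        exact this.1
      have hcong : ∀ (e : PySem.Dict String (PySem.Set String)),
          (∀ k ∈ d.keys.erase aspect, e.getD k PySem.Set.empty = d.getD k PySem.Set.empty) →
          ((d.keys.erase aspect).map
            (fun k => PySem.Set.len (e.getD k PySem.Set.empty))).sum =
          ((d.keys.erase aspect).map
            (fun k => PySem.Set.len (d.getD k PySem.Set.empty))).sum := by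
        intro e he
        congr 1
        exact List.map_congr_left (fun k hkm => by rw [he k hkm])
      have hsum' : (d'.keys.map (fun k => PySem.Set.len (d'.getD k PySem.Set.empty))).sum
          = PySem.Set.len (PySem.Set.add old term) +
            ((d.keys.erase aspect).map
              (fun k => PySem.Set.len (d.getD k PySem.Set.empty))).sum := by
        rw [hkeys, (hperm.map _).sum_eq, List.map_cons, List.sum_cons]
        rw [hgetD' aspect, if_pos rfl]
        congr 1
        exact hcong d' (fun k hkm => by rw [hgetD' k, if_neg (hne k hkm)])
      have hsum0 : (d.keys.map (fun k => PySem.Set.len (d.getD k PySem.Set.empty))).sum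
          = PySem.Set.len old +
            ((d.keys.erase aspect).map
              (fun k => PySem.Set.len (d.getD k PySem.Set.empty))).sum := by
        rw [(hperm.map _).sum_eq, List.map_cons, List.sum_cons]
      rw [hsum', hsadd, hlen_add]
      rw [hsum0] at hsum
      by_cases hmo : term ∈ old <;> simp [hmo] at hsum ⊢ <;> omega
    · -- fresh key: appended at the end, and the old value is empty
      have hcf : d.contains aspect = false := by
        cases h : d.contains aspect
        · rfl
        · exact absurd h hc
      have hkeys : d'.keys = d.keys ++ [aspect] := by
        rw [hd']; exact PySem.Dict.keys_insert_of_not_contains d _ hcf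
      have holde : old = PySem.Set.empty := by
        rw [hold]; exact PySem.Dict.getD_of_not_contains d _ hcf
      have hne : ∀ k ∈ d.keys, k ≠ aspect := by
        intro k hkm h
        exact hc ((PySem.Dict.contains_iff_mem_keys d aspect).mpr (h ▸ hkm))
      have hmo : term ∉ old := by rw [holde]; simp [PySem.Set.empty]
      rw [hkeys, List.map_append, List.sum_append]
      have h1 : (d.keys.map (fun k => PySem.Set.len (d'.getD k PySem.Set.empty))).sum
          = (d.keys.map (fun k => PySem.Set.len (d.getD k PySem.Set.empty))).sum := by
        congr 1
        exact List.map_congr_left (fun k hkm => by rw [hgetD' k, if_neg (hne k hkm)])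
      rw [h1, hsum, hsadd, if_neg hmo]
      simp only [List.map_cons, List.map_nil, List.sum_cons, List.sum_nil, add_zero]
      rw [hgetD' aspect, if_pos rfl, hlen_add, if_neg hmo, holde]
      simp [PySem.Set.len, PySem.Set.empty]

theorem collect_parse_inv (rows : List String) :
    ∀ (d : PySem.Dict String (PySem.Set String)) (s : PySem.Set (String × String)),
    d.keys.Nodup → s.Nodup →
    (∀ t a, (t, a) ∈ s ↔ t ∈ d.getD a PySem.Set.empty) →
    ((d.keys.map (fun k => PySem.Set.len (d.getD k PySem.Set.empty))).sum
      = PySem.Set.len s) →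
    (rows.foldl (fun d row =>
      match parse_label_row row with
      | none => d
      | some r => d.insert r.2.2 (PySem.Set.add (d.getD r.2.2 PySem.Set.empty) r.2.1))
      d).keys.Nodup ∧
    (rows.foldl (fun s row =>
      match parse_label_row row with
      | none => s
      | some r => PySem.Set.add s (r.2.1, r.2.2)) s).Nodup ∧
    (∀ t a, (t, a) ∈ rows.foldl (fun s row =>
      match parse_label_row row with
      | none => s
      | some r => PySem.Set.add s (r.2.1, r.2.2)) s ↔
      t ∈ (rows.foldl (fun d row =>
        match parse_label_row row with
        | none => d
        | some r => d.insert r.2.2 (PySem.Set.add (d.getD r.2.2 PySem.Set.empty) r.2.1))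
        d).getD a PySem.Set.empty) ∧
    (((rows.foldl (fun d row =>
      match parse_label_row row with
      | none => d
      | some r => d.insert r.2.2 (PySem.Set.add (d.getD r.2.2 PySem.Set.empty) r.2.1))
      d).keys.map (fun k => PySem.Set.len ((rows.foldl (fun d row =>
        match parse_label_row row with
        | none => d
        | some r => d.insert r.2.2 (PySem.Set.add (d.getD r.2.2 PySem.Set.empty) r.2.1))
        d).getD k PySem.Set.empty))).sum
      = PySem.Set.len (rows.foldl (fun s row =>
        match parse_label_row row with
        | none => s
        | some r => PySem.Set.add s (r.2.1, r.2.2)) s)) := by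
  induction rows with
  | nil => intro d s h1 h2 h3 h4; exact ⟨h1, h2, h3, h4⟩
  | cons row rest ih =>
    intro d s h1 h2 h3 h4
    simp only [List.foldl_cons]
    cases hp : parse_label_row row with
    | none => exact ih d s h1 h2 h3 h4
    | some r =>
      obtain ⟨g1, g2, g3, g4⟩ := step_inv d s r.2.1 r.2.2 h1 h2 h3 h4
      exact ih _ _ g1 g2 g3 g4

theorem mem_items_getD (d : PySem.Dict String (PySem.Set String)) (hk : d.keys.Nodup)
    (t a : String) :
    (∃ it ∈ d.items, a = it.1 ∧ t ∈ it.2) ↔ t ∈ d.getD a PySem.Set.empty := by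
  constructor
  · rintro ⟨it, hit, rfl, ht⟩
    rwa [PySem.Dict.getD_of_mem_items d (by simpa using hit) hk]
  · intro ht
    rw [PySem.Dict.getD_eq_get?_getD] at ht
    cases hg : d.get? a with
    | none => rw [hg] at ht; simp [PySem.Set.empty] at ht
    | some v =>
      rw [hg] at ht
      exact ⟨(a, v), PySem.Dict.mem_items_of_get?_eq_some d hg, rfl, ht⟩

theorem sorted2_eq_sorted_lex (xs : List (String × String)) :
    PySem.List.sorted2 xs (fun p => p.2) (fun p => p.1) false =
      PySem.List.sorted xs (fun p => (toLex (p.2, p.1) : String ×ₗ String)) false := by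
  have hbe : (fun (a b : String × String) =>
        decide (a.2 < b.2) || (!decide (b.2 < a.2) && decide (a.1 < b.1)))
      = (fun (a b : String × String) =>
        decide ((toLex (a.2, a.1) : String ×ₗ String) < toLex (b.2, b.1))) := by
    funext a b
    have hl : ((toLex (a.2, a.1) : String ×ₗ String) < toLex (b.2, b.1)) ↔
        (a.2 < b.2 ∨ (a.2 = b.2 ∧ a.1 < b.1)) := Prod.Lex.toLex_lt_toLex
    apply Bool.eq_iff_iff.mpr
    simp only [Bool.or_eq_true, Bool.and_eq_true, Bool.not_eq_eq_eq_not, Bool.not_true,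
      decide_eq_true_eq, decide_eq_false_iff_not, hl]
    constructor
    · rintro (h | ⟨h2, h3⟩)
      · exact Or.inl h
      · rcases lt_trichotomy a.2 b.2 with h4 | h4 | h4
        · exact Or.inl h4
        · exact Or.inr ⟨h4, h3⟩
        · exact absurd h4 h2
    · rintro (h | ⟨h2, h3⟩)
      · exact Or.inl h
      · exact Or.inr ⟨fun h4 => absurd h4 (h2 ▸ lt_irrefl _), h3⟩
  unfold PySem.List.sorted2 PySem.List.sorted
  simp only [if_neg (by decide : ¬ (false = true)), hbe]

theorem sorted2_pairs_eq_of_perm (xs ys : List (String × String)) (h : xs.Perm ys) :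
    PySem.List.sorted2 xs (fun p => p.2) (fun p => p.1) false =
      PySem.List.sorted2 ys (fun p => p.2) (fun p => p.1) false := by
  rw [sorted2_eq_sorted_lex, sorted2_eq_sorted_lex]
  apply PySem.List.sorted_eq_sorted_of_perm
  · intro p q hpq
    have : (p.2, p.1) = (q.2, q.1) := toLex.injective hpq
    cases p; cases q; simp_all
  · exact h

-- per-protein bridge: B's propagated pair set is a permutation of A's, and A's
-- before-count (sum over the aspect dict's value sets) is B's len(pairs)
theorem protein_bridge (parents : List (String × List String)) (rows : List String) :
    (propPairs parents (parsePairs rows)).Perm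
      ((collectLabels rows).items.foldl
        (fun acc it => (bfsA parents it.1 it.2 PySem.Set.empty acc).2) PySem.Set.empty) ∧
    ((collectLabels rows).values.map (fun s => PySem.Set.len s)).sum
      = PySem.Set.len (parsePairs rows) := by
  have h0 : (PySem.Dict.empty : PySem.Dict String (PySem.Set String)).keys.Nodup := by
    simp [PySem.Dict.keys_empty]
  have hinv := collect_parse_inv rows PySem.Dict.empty PySem.Set.empty h0
    (by simp [PySem.Set.empty])
    (by intro t a; simp [PySem.Set.empty, PySem.Dict.getD_empty])
    (by simp [PySem.Dict.keys_empty, PySem.Set.len, PySem.Set.empty])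
  obtain ⟨hk, hs, hmem, hsum⟩ := hinv
  have hA := propA_spec parents (collectLabels rows).items PySem.Set.empty List.nodup_nil
  have hB := propPairs_inv parents (parsePairs rows) PySem.Set.empty List.nodup_nil
  constructor
  · apply (List.perm_ext_iff_of_nodup hB.1 hA.1).mpr
    intro p
    rw [(hB.2 p), (hA.2 p)]
    have hbridge : (∃ q ∈ parsePairs rows, p.2 = q.2 ∧ Reach parents q.1 p.1) ↔
        ∃ it ∈ (collectLabels rows).items, p.2 = it.1 ∧ ∃ t ∈ it.2, Reach parents t p.1 := by
      constructor
      · rintro ⟨q, hq, hpa, hr⟩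
        have := (hmem q.1 q.2).mp (by simpa [collectLabels, parsePairs] using hq)
        obtain ⟨it, hit, heq, ht⟩ := (mem_items_getD (collectLabels rows) hk q.1 q.2).mpr
          (by simpa [collectLabels] using this)
        exact ⟨it, hit, heq ▸ hpa, q.1, ht, hr⟩
      · rintro ⟨it, hit, hpa, u, hu, hr⟩
        have := (mem_items_getD (collectLabels rows) hk u it.1).mp ⟨it, hit, rfl, hu⟩
        have hqin : (u, it.1) ∈ parsePairs rows := by
          rw [show parsePairs rows = rows.foldl (fun s row =>
            match parse_label_row row with
            | none => s
            | some r => PySem.Set.add s (r.2.1, r.2.2)) PySem.Set.empty from rfl]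
          exact (hmem u it.1).mpr (by simpa [collectLabels] using this)
        exact ⟨(u, it.1), hqin, hpa, hr⟩
    simp only [PySem.Set.empty, List.not_mem_nil, false_or]
    exact hbridge
  · rw [PySem.Dict.values_eq_map_keys (collectLabels rows) hk PySem.Set.empty,
      List.map_map]
    exact hsum

-- lines, before and after agree per protein
theorem protein_components (parents : List (String × List String))
    (pr : String × List String) :
    (PySem.List.sorted2 ((collectLabels pr.2).items.foldl
        (fun acc it => (bfsA parents it.1 it.2 PySem.Set.empty acc).2) PySem.Set.empty)
        (fun p => p.2) (fun p => p.1) false).map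
        (fun p => pr.1 ++ "\t" ++ p.1 ++ "\t" ++ p.2) = (proteinResult parents pr).2.1 ∧
    ((collectLabels pr.2).values.map (fun s => PySem.Set.len s)).sum
      = (proteinResult parents pr).2.2.1 ∧
    PySem.Set.len ((collectLabels pr.2).items.foldl
        (fun acc it => (bfsA parents it.1 it.2 PySem.Set.empty acc).2) PySem.Set.empty)
      = (proteinResult parents pr).2.2.2 := by
  obtain ⟨hperm, hsum⟩ := protein_bridge parents pr.2
  refine ⟨?_, hsum, ?_⟩
  · rw [sorted2_pairs_eq_of_perm _ _ hperm.symm]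
    rfl
  · show PySem.Set.len _ = PySem.Set.len (propPairs parents (parsePairs pr.2))
    simp only [PySem.Set.len]
    rw [hperm.length_eq]

theorem main_fold (parents : List (String × List String)) :
    ∀ (l : List (String × List String)) (d : PySem.Dict String (List String)) (b a : Int),
    l.foldl (fun st pr =>
      let lba := collectLabels pr.2
      let prop := lba.items.foldl
        (fun acc it => (bfsA parents it.1 it.2 PySem.Set.empty acc).2) PySem.Set.empty
      let sortedPairs := PySem.List.sorted2 prop (fun p => p.2) (fun p => p.1) false
      (st.1.insert pr.1 (sortedPairs.map (fun p => pr.1 ++ "\t" ++ p.1 ++ "\t" ++ p.2)),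
       st.2.1 + (lba.values.map (fun s => PySem.Set.len s)).sum,
       st.2.2 + PySem.Set.len prop)) (d, b, a) =
    ((l.map (proteinResult parents)).foldl (fun dd r => dd.insert r.1 r.2.1) d,
     b + ((l.map (proteinResult parents)).map (fun r => r.2.2.1)).sum,
     a + ((l.map (proteinResult parents)).map (fun r => r.2.2.2)).sum) := by
  intro l
  induction l with
  | nil => intro d b a; simp
  | cons pr tl ih =>
    intro d b a
    obtain ⟨hl, hb, ha⟩ := protein_components parents pr
    simp only [List.foldl_cons, List.map_cons, List.sum_cons]
    rw [hl, hb, ha, ih, add_assoc, add_assoc,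
      show (proteinResult parents pr).1 = pr.1 from rfl]

theorem final_check : ∀ (rbp parents : List (String × List String)),
    propagate_labels rbp parents = propagate_labels_alt rbp parents := by
  intro rbp parents
  unfold propagate_labels propagate_labels_alt
  rw [main_fold parents rbp PySem.Dict.empty 0 0]
  simp

-- ===== VERDICT (by name: the statement is the Claim_ definition above) =====
theorem propagate_labels_spec : Claim_equal_propagate_labels := by
  intro rows_by_protein_id parents _
  unfold Spec_propagate_labels
  exact final_check rows_by_protein_id parents
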